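-- pv_equiv track=rewrite | github.com/Shao-Group/Telos-test | src/extract_features.py | _count_degenerate_motif
-- ===== SOURCE A (Python) =====
-- def _count_degenerate_motif(sequence, motif, max_mismatches=1):
--     """Count occurrences of motif allowing up to max_mismatches."""
--     count = 0
--     motif_len = len(motif)
--
--     for i in range(len(sequence) - motif_len + 1):
--         subseq = sequence[i:i + motif_len]
--         mismatches = sum(1 for a, b in zip(subseq, motif) if a != b)
--         if mismatches <= max_mismatches:
--             count += 1
--
--     return count
-- ===== SOURCE B (Python) =====
-- def _count_degenerate_motif(sequence, motif, max_mismatches=1):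
--     """Count occurrences of motif allowing up to max_mismatches.
--
--     Column-major re-implementation: fill a per-window mismatch table one
--     motif position at a time, then count the windows under the threshold.
--     """
--     motif_len = len(motif)
--     n = len(sequence) - motif_len + 1
--     if n <= 0:
--         return 0
--     scores = [0] * n
--     for j in range(motif_len):
--         mj = motif[j]
--         for i in range(n):
--             if sequence[i + j] != mj:
--                 scores[i] += 1
--     return sum(1 for s in scores if s <= max_mismatches)
-- ===== Notes on version B (the rewrite author's own statement) =====
-- stated objective: alternative
-- what changed: Instead of finishing each window independently (row-major: slice, zip, count, test), B fills an explicit per-window mismatch-score table column-major over motif positions and then counts qualifying windows in a separate second pass.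
import Mathlib
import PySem

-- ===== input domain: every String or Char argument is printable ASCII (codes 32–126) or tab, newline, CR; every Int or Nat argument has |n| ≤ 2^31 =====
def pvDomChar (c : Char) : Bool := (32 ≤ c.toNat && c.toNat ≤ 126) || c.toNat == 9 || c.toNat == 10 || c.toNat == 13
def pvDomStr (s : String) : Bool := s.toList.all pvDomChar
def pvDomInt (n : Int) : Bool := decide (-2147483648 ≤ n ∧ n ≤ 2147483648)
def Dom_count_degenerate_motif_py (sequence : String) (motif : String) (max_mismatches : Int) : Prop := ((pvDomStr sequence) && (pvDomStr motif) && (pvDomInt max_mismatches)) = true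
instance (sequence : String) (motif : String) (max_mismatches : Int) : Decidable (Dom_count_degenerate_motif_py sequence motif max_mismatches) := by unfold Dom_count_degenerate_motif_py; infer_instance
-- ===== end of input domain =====

-- B re-implements A by a different decomposition (a per-window mismatch table filled
-- column-by-column over motif positions, then a separate counting pass); same cost,
-- proved to return the same value on every input.

-- ===== PORT A =====
-- literal transliteration of A: for each window start i, slice the window,
-- count mismatches against the motif by zipping, and count windows under the threshold.
def count_degenerate_motif_py (sequence : String) (motif : String) (max_mismatches : Int) : Int :=
  let s := sequence.toList
  let m := motif.toList
  let motif_len : Int := m.length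
  (PySem.List.pyRange 0 ((s.length : Int) - motif_len + 1) 1).foldl
    (fun count i =>
      let subseq := PySem.List.slice s (some i) (some (i + motif_len))
      let mismatches : Int := ((subseq.zip m).countP (fun p => p.1 != p.2) : Nat)
      if mismatches ≤ max_mismatches then count + 1 else count) 0

-- ===== PORT B =====
-- literal transliteration of Source B: the score table is [0]*n (List.replicate),
-- filled column-major; every index used is nonnegative and in range.
def count_degenerate_motif_py_alt (sequence : String) (motif : String) (max_mismatches : Int) : Int :=
  let s := sequence.toList
  let m := motif.toList
  let motif_len : Int := m.length
  let n : Int := (s.length : Int) - motif_len + 1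
  if n ≤ 0 then 0
  else
    let scores0 : List Int := List.replicate n.toNat 0
    let scores := (PySem.List.pyRange 0 motif_len 1).foldl
      (fun sc j =>
        let mj := PySem.List.pyGetD m j ' '
        (PySem.List.pyRange 0 n 1).foldl
          (fun sc' i =>
            if PySem.List.pyGetD s (i + j) ' ' != mj
            then PySem.List.pySetD sc' i (PySem.List.pyGetD sc' i 0 + 1)
            else sc') sc) scores0
    scores.foldl (fun acc sv => if sv ≤ max_mismatches then acc + 1 else acc) 0

-- ===== PRECONDITION & SPEC =====
def Spec_count_degenerate_motif_py (sequence : String) (motif : String) (max_mismatches : Int) (out : Int) : Prop := out = count_degenerate_motif_py_alt sequence motif max_mismatches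
instance (sequence : String) (motif : String) (max_mismatches : Int) (out : Int) : Decidable (Spec_count_degenerate_motif_py sequence motif max_mismatches out) := by unfold Spec_count_degenerate_motif_py; infer_instance

-- ===== CLAIM (what is proved, stated in full; the proofs are below) =====
def Claim_equal_count_degenerate_motif_py : Prop := ∀ (sequence : String) (motif : String) (max_mismatches : Int), Dom_count_degenerate_motif_py sequence motif max_mismatches → Spec_count_degenerate_motif_py sequence motif max_mismatches (count_degenerate_motif_py sequence motif max_mismatches)

-- ===== LEMMAS AND PROOFS =====

-- mismatch count of window k against the first J motif positions
def pvMis (s m : List Char) (J k : Nat) : Nat :=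
  (List.range J).countP (fun j => s.getD (k + j) ' ' != m.getD j ' ')

theorem pv_set_map_range {n k : Nat} (hk : k < n) (g : Nat → Int) (v : Int) :
    ((List.range n).map g).set k v = (List.range n).map (fun i => if i = k then v else g i) := by
  apply List.ext_getElem
  · simp
  · intro i h1 h2
    simp only [List.getElem_set, List.getElem_map, List.getElem_range]
    by_cases h : k = i
    · simp [h]
    · rw [if_neg h, if_neg (fun he : i = k => h he.symm)]

theorem pv_fold_upd (p : Nat → Bool) (n : Nat) (g : Nat → Int) :
    ∀ (k : Nat), k ≤ n →
    (List.range k).foldl (fun sc i => if p i then sc.set i (sc.getD i 0 + 1) else sc)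
      ((List.range n).map g)
    = (List.range n).map (fun i => if i < k ∧ p i then g i + 1 else g i) := by
  intro k
  induction k with
  | zero => intro _; simp
  | succ k ih =>
    intro hk
    rw [List.range_succ, List.foldl_append, ih (by omega)]
    by_cases hp : p k
    · simp only [List.foldl_cons, List.foldl_nil, hp, if_pos]
      rw [PySem.List.getD_map_range _ _ _ _ (by omega),
          pv_set_map_range (by omega)]
      apply List.map_congr_left
      intro i hi
      simp only [List.mem_range] at hi
      by_cases h : i = k
      · subst h; simp [hp]
      · rw [if_neg h]
        simp [show (i < k + 1) ↔ i < k by omega]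
    · simp only [List.foldl_cons, List.foldl_nil, hp, if_neg, Bool.false_eq_true,
        not_false_iff]
      apply List.map_congr_left
      intro i hi
      simp only [List.mem_range] at hi
      by_cases h : i = k
      · subst h; simp [hp]
      · simp [show (i < k + 1) ↔ i < k by omega]

theorem pv_mis_succ (s m : List Char) (J k : Nat) :
    pvMis s m (J + 1) k
      = pvMis s m J k + (if s.getD (k + J) ' ' != m.getD J ' ' then 1 else 0) := by
  simp [pvMis, List.range_succ, List.countP_append]

-- the filled table: column-major fold over motif positions
theorem pv_outer_fold (s m : List Char) (n : Nat) :
    ∀ (J : Nat), J ≤ m.length →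
    (List.range J).foldl
      (fun sc j =>
        (List.range n).foldl
          (fun sc' i => if s.getD (i + j) ' ' != m.getD j ' '
                        then sc'.set i (sc'.getD i 0 + 1) else sc') sc)
      ((List.range n).map (fun _ => (0 : Int)))
    = (List.range n).map (fun i => (pvMis s m J i : Int)) := by
  intro J
  induction J with
  | zero => intro _; simp [pvMis]
  | succ J ih =>
    intro hJ
    rw [List.range_succ, List.foldl_append, ih (by omega)]
    simp only [List.foldl_cons, List.foldl_nil]
    rw [pv_fold_upd (fun i => s.getD (i + J) ' ' != m.getD J ' ') n
      (fun i => (pvMis s m J i : Int)) n (le_refl n)]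
    apply List.map_congr_left
    intro i hi
    simp only [List.mem_range] at hi
    simp only [hi, true_and]
    rw [pv_mis_succ]
    push_cast
    split_ifs <;> ring

theorem pv_window (s m : List Char) (k : Nat) (hk : k + m.length ≤ s.length) :
    (((s.drop k).take m.length).zip m).countP (fun p => p.1 != p.2) = pvMis s m m.length k := by
  have hz : ((s.drop k).take m.length).zip m
      = (List.range m.length).map (fun j => (s.getD (k + j) ' ', m.getD j ' ')) := by
    apply List.ext_getElem
    · simp; omega
    · intro i h1 h2
      simp only [List.length_zip, List.length_take, List.length_drop] at h1
      have hi : i < m.length := by omega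
      have his : k + i < s.length := by omega
      simp only [List.getElem_zip, List.getElem_take, List.getElem_drop,
        List.getElem_map, List.getElem_range]
      rw [List.getD_eq_getElem s ' ' his, List.getD_eq_getElem m ' ' hi]
  rw [hz, List.countP_map]
  rfl

-- main equivalence
theorem pv_main (sequence motif : String) (max_mismatches : Int) :
    count_degenerate_motif_py sequence motif max_mismatches
    = count_degenerate_motif_py_alt sequence motif max_mismatches := by
  simp only [count_degenerate_motif_py, count_degenerate_motif_py_alt]
  set s := sequence.toList with hs
  set m := motif.toList with hm
  by_cases hn : (s.length : Int) - (m.length : Int) + 1 ≤ 0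
  · rw [if_pos hn, PySem.List.pyRange_one_eq_nil (by omega)]
    rfl
  · rw [if_neg hn]
    have hml : m.length ≤ s.length := by omega
    set N : Nat := ((s.length : Int) - (m.length : Int) + 1).toNat with hN
    have hNc : ((N : Int)) = (s.length : Int) - (m.length : Int) + 1 := by
      simp [hN]; omega
    have hNs : N + m.length = s.length + 1 := by omega
    -- B side
    have hrep : List.replicate N (0 : Int) = (List.range N).map (fun _ => (0 : Int)) := by
      simp [List.map_const']
    have hB :
        ((PySem.List.pyRange 0 ((m.length : Int)) 1).foldl
          (fun sc j =>
            (PySem.List.pyRange 0 ((s.length : Int) - (m.length : Int) + 1) 1).foldl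
              (fun sc' i =>
                if PySem.List.pyGetD s (i + j) ' ' != PySem.List.pyGetD m j ' '
                then PySem.List.pySetD sc' i (PySem.List.pyGetD sc' i 0 + 1)
                else sc') sc)
          (List.replicate ((s.length : Int) - (m.length : Int) + 1).toNat 0))
        = (List.range N).map (fun i => (pvMis s m m.length i : Int)) := by
      rw [← hNc]
      simp only [Int.toNat_natCast, hrep, PySem.List.pyRange_zero_natCast, List.foldl_map,
        ← Nat.cast_add, PySem.List.pyGetD_natCast, PySem.List.pySetD_natCast]
      exact pv_outer_fold s m N m.length (le_refl _)
    rw [hB]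
    -- final counting pass on B's side
    rw [PySem.List.foldl_ite_add_one (fun sv => sv ≤ max_mismatches)
        ((List.range N).map (fun i => (pvMis s m m.length i : Int))) 0]
    rw [List.countP_map]
    -- A side
    rw [← hNc, PySem.List.pyRange_zero_natCast, List.foldl_map]
    have hAbody : (fun (count : Int) (k : Nat) =>
        if ((((PySem.List.slice s (some (k : Int)) (some ((k : Int) + (m.length : Int)))).zip
            m).countP (fun p => p.1 != p.2) : Nat) : Int) ≤ max_mismatches
        then count + 1 else count)
        = (fun (count : Int) (k : Nat) =>
          if (((((s.drop k).take m.length).zip m).countP (fun p => p.1 != p.2) : Nat) : Int)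
              ≤ max_mismatches
          then count + 1 else count) := by
      funext count k
      rw [show ((m.length : Int)) = (((m.length : Nat)) : Int) by rfl,
          PySem.List.slice_natCast_add]
    rw [hAbody]
    rw [PySem.List.foldl_ite_add_one
        (fun k => (((((s.drop k).take m.length).zip m).countP (fun p => p.1 != p.2) : Nat) : Int)
          ≤ max_mismatches) (List.range N) 0]
    congr 1
    congr 1
    apply List.countP_congr
    intro k hk
    simp only [List.mem_range] at hk
    have hwin : k + m.length ≤ s.length := by omega
    simp [Function.comp, pv_window s m k hwin]

-- ===== VERDICT (by name: the statement is the Claim_ definition above) =====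
theorem count_degenerate_motif_py_spec : Claim_equal_count_degenerate_motif_py := by
  intro sequence motif max_mismatches _
  exact pv_main sequence motif max_mismatches
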